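-- pv_equiv track=rewrite | github.com/poncem91/poker-evaluation-and-simulation | poker.py | n_of_a_kind
-- ===== SOURCE A (Python) =====
-- def n_of_a_kind(ranks, n):
--     count = 0  # counter for n-sized occurences
--
--     # copies list of ranks to temp list
--     tempList = [ranks[i] for i in range(len(ranks))]
--
--     # iterates over templist, checking if n-sized groups found, if so, deletes those ranks from tempList
--     while len(tempList) > 1:
--         if tempList.count(tempList[0]) == n:
--             count += 1
--         for i in range(tempList.count(tempList[0])):
--             tempList.pop(0)
--
--     return count
-- ===== SOURCE B (Python) =====
-- def n_of_a_kind(ranks, n):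
--     # One pass from the right builds occ[i] = number of occurrences of ranks[i]
--     # in ranks[i:]; then a pointer jumps over each removed block in O(1).
--     m = len(ranks)
--     occ = [0] * m
--     cnt = {}
--     for i in range(m - 1, -1, -1):
--         cnt[ranks[i]] = cnt.get(ranks[i], 0) + 1
--         occ[i] = cnt[ranks[i]]
--     count = 0
--     i = 0
--     while m - i > 1:
--         c = occ[i]
--         if c == n:
--             count += 1
--         i += c
--     return count
-- ===== Notes on version B (the rewrite author's own statement) =====
-- stated objective: faster
-- what changed: A rescans the remaining list with list.count and pops elements one by one each round (quadratic); B builds suffix occurrence counts in one right-to-left pass with a dict and then a pointer jumps over each removed block in O(1).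
import Mathlib
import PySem

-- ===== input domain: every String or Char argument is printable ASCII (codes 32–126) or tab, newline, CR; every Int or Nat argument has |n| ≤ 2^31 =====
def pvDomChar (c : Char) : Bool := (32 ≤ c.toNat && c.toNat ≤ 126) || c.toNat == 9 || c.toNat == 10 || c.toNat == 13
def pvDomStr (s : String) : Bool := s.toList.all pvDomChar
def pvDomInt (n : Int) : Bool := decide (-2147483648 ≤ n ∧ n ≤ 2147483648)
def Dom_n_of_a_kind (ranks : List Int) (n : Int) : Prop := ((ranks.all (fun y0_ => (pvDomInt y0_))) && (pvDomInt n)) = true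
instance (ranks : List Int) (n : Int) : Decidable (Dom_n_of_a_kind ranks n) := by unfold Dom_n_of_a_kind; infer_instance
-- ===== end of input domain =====

-- B replaces A's quadratic repeated-count-and-pop loop by a single right-to-left
-- counting pass plus a pointer that jumps over each removed block (objective: faster).

-- ===== PORT A =====
-- the while-loop: pop(0) repeated c times is List.drop c
def pvALoop (tempList : List Int) (n : Int) (count : Int) : Int :=
  if h1 : 1 < tempList.length then
    pvALoop (tempList.drop (tempList.count tempList.headI)) n
      (if (tempList.count tempList.headI : Int) = n then count + 1 else count)
  else count
termination_by tempList.length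
decreasing_by
  cases tempList with
  | nil => simp at h1
  | cons a t => simp only [List.length_drop, List.headI, List.count_cons_self]; omega

def n_of_a_kind (ranks : List Int) (n : Int) : Int :=
  let tempList := (List.range ranks.length).map (fun i => ranks.getD i 0)  -- [ranks[i] for i in range(len(ranks))]
  pvALoop tempList n 0

-- ===== PORT B =====
-- the backward for-loop: occ[i] = cnt[ranks[i]] after incrementing; counts kept as Nat
def pvOcc : List Int → PySem.Dict Int Nat → List Nat × PySem.Dict Int Nat
  | [], d => ([], d)
  | r :: rest, d =>
    let p := pvOcc rest d
    let c := p.2.getD r 0 + 1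
    (c :: p.1, p.2.insert r c)

theorem pvOcc_pos (l : List Int) (d : PySem.Dict Int Nat) :
    ∀ x ∈ (pvOcc l d).1, 0 < x := by
  induction l generalizing d with
  | nil => simp [pvOcc]
  | cons r rest ih =>
    intro x hx
    simp only [pvOcc, List.mem_cons] at hx
    rcases hx with h | h
    · omega
    · exact ih d x h

-- the pointer loop: 'i += c' over occ is structural recursion dropping c entries
def pvBLoop (occ : List Nat) (hpos : ∀ x ∈ occ, 0 < x) (n : Int) (count : Int) : Int :=
  if h1 : 1 < occ.length then
    pvBLoop (occ.drop occ.headI) (fun x hx => hpos x (List.mem_of_mem_drop hx)) n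
      (if (occ.headI : Int) = n then count + 1 else count)
  else count
termination_by occ.length
decreasing_by
  cases occ with
  | nil => simp at h1
  | cons a t =>
    have hc : 0 < a := hpos a (List.mem_cons_self)
    simp only [List.length_drop, List.headI]; omega

def n_of_a_kind_alt (ranks : List Int) (n : Int) : Int :=
  pvBLoop (pvOcc ranks PySem.Dict.empty).1 (pvOcc_pos ranks PySem.Dict.empty) n 0

-- ===== PRECONDITION & SPEC =====
def Spec_n_of_a_kind (ranks : List Int) (n : Int) (out : Int) : Prop := out = n_of_a_kind_alt ranks n
instance (ranks : List Int) (n : Int) (out : Int) : Decidable (Spec_n_of_a_kind ranks n out) := by unfold Spec_n_of_a_kind; infer_instance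

-- ===== CLAIM (what is proved, stated in full; the proofs are below) =====
def Claim_equal_n_of_a_kind : Prop := ∀ (ranks : List Int) (n : Int), Dom_n_of_a_kind ranks n → Spec_n_of_a_kind ranks n (n_of_a_kind ranks n)

-- ===== LEMMAS AND PROOFS =====

-- the dict after the pass counts each value: base counts plus occurrences in l
theorem pvOcc_dict_getD (l : List Int) :
    ∀ (d : PySem.Dict Int Nat) (x : Int),
      (pvOcc l d).2.getD x 0 = d.getD x 0 + l.count x := by
  induction l with
  | nil => intro d x; simp [pvOcc]
  | cons r rest ih =>
    intro d x
    simp only [pvOcc, PySem.Dict.getD_insert, ih, List.count_cons, beq_iff_eq]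
    by_cases hx : x = r
    · subst hx; simp; omega
    · simp [hx, Ne.symm hx]

-- head entry of occ for a nonempty list is the full count of the head
theorem pvOcc_cons (r : Int) (rest : List Int) (d : PySem.Dict Int Nat) :
    (pvOcc (r :: rest) d).1 = (d.getD r 0 + rest.count r + 1) :: (pvOcc rest d).1 := by
  simp [pvOcc, pvOcc_dict_getD]

theorem pvOcc_length (l : List Int) (d : PySem.Dict Int Nat) :
    (pvOcc l d).1.length = l.length := by
  induction l generalizing d with
  | nil => rfl
  | cons r rest ih => simp [pvOcc, ih]

-- occ entries only depend on the suffix: dropping k entries = occ of the dropped list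
theorem pvOcc_drop (l : List Int) (d : PySem.Dict Int Nat) (k : Nat) :
    (pvOcc l d).1.drop k = (pvOcc (l.drop k) d).1 := by
  induction l generalizing k with
  | nil => simp [pvOcc]
  | cons r rest ih =>
    cases k with
    | zero => rfl
    | succ k => simpa [pvOcc] using ih k

-- pvBLoop ignores which positivity proof it is given
theorem pvBLoop_congr (o1 o2 : List Nat) (h1 : ∀ x ∈ o1, 0 < x) (h2 : ∀ x ∈ o2, 0 < x)
    (n count : Int) (h : o1 = o2) : pvBLoop o1 h1 n count = pvBLoop o2 h2 n count := by
  subst h; rfl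

theorem pvLoop_eq (l : List Int) (n count : Int) :
    pvALoop l n count
      = pvBLoop (pvOcc l PySem.Dict.empty).1 (pvOcc_pos l PySem.Dict.empty) n count := by
  induction hN : l.length using Nat.strong_induction_on generalizing l count with
  | _ N ih =>
    rw [pvALoop, pvBLoop]
    by_cases h1 : 1 < l.length
    · have hne : l ≠ [] := by intro h; simp [h] at h1
      obtain ⟨r, rest, rfl⟩ := List.exists_cons_of_ne_nil hne
      have hoccl : 1 < (pvOcc (r :: rest) PySem.Dict.empty).1.length := by
        rw [pvOcc_length]; exact h1
      rw [dif_pos h1, dif_pos hoccl]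
      have hhead : (pvOcc (r :: rest) PySem.Dict.empty).1.headI = (r :: rest).count r := by
        simp [pvOcc_cons, PySem.Dict.getD_empty]
      have hc : (r :: rest).headI = r := rfl
      rw [hc]
      have hheadZ : (((pvOcc (r :: rest) PySem.Dict.empty).1.headI : Nat) : Int)
          = (((r :: rest).count r : Nat) : Int) := by rw [hhead]
      rw [hheadZ]
      have hdrop := pvOcc_drop (r :: rest) PySem.Dict.empty ((r :: rest).count r)
      have hlist : (pvOcc (r :: rest) PySem.Dict.empty).1.drop
            (pvOcc (r :: rest) PySem.Dict.empty).1.headI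
          = (pvOcc ((r :: rest).drop ((r :: rest).count r)) PySem.Dict.empty).1 := by
        rw [hhead]; exact hdrop
      have hcpos : 0 < (r :: rest).count r :=
        List.count_pos_iff.mpr (List.mem_cons_self)
      have hrec := ih ((r :: rest).drop ((r :: rest).count r)).length
        (by simp only [List.length_drop]; omega)
        ((r :: rest).drop ((r :: rest).count r))
        (if (((r :: rest).count r : Nat) : Int) = n then count + 1 else count) rfl
      exact hrec.trans (pvBLoop_congr _ _ _ _ _ _ hlist.symm)
    · have hoccl : ¬ 1 < (pvOcc l PySem.Dict.empty).1.length := by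
        rw [pvOcc_length]; exact h1
      rw [dif_neg h1, dif_neg hoccl]

theorem pvCopy_eq (ranks : List Int) :
    (List.range ranks.length).map (fun i => ranks.getD i 0) = ranks := by
  apply List.ext_getElem
  · simp
  · intro i h1 h2
    simp [List.getD_eq_getElem?_getD, List.getElem?_eq_getElem h2]

-- ===== VERDICT (by name: the statement is the Claim_ definition above) =====
theorem n_of_a_kind_spec : Claim_equal_n_of_a_kind := by
  intro ranks n _
  unfold Spec_n_of_a_kind n_of_a_kind n_of_a_kind_alt
  simp only [pvCopy_eq]
  exact pvLoop_eq ranks n 0
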